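-- pv_equiv track=rewrite | github.com/enricotomasi/GeeksforGeeks_problems | Easy/Faulty Keyboard.py | maxNatural
-- ===== SOURCE A (Python) =====
-- def maxNatural(M):
--     # code here
--     n = M
--     ans = 0
--
--     for i in range(1, M+1):
--         cifre = len(str(i))
--         if cifre <= n:
--             n -= cifre
--             ans += 1
--
--     return ans
-- ===== SOURCE B (Python) =====
-- def maxNatural(M):
--     # Greedy over digit-length blocks: there are 9 * 10**(d-1) numbers with
--     # exactly d digits, each costing d characters to write.
--     return _count(M, 0, 1, 1)
--
--
-- def _count(remaining, ans, d, lo):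
--     # lo == 10**(d-1): the smallest d-digit number; ans == lo - 1 numbers written.
--     if remaining < d:
--         return ans
--     block = 9 * lo
--     cost = block * d
--     if remaining < cost:
--         return ans + remaining // d
--     return _count(remaining - cost, ans + block, d + 1, lo * 10)
-- ===== Notes on version B (the rewrite author's own statement) =====
-- stated objective: faster
-- what changed: Replaces the per-number loop that builds str(i) for every i up to M with a greedy recursion over digit-length blocks (9*10^(d-1) numbers of length d), finishing the last block by one integer division.
import Mathlib
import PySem

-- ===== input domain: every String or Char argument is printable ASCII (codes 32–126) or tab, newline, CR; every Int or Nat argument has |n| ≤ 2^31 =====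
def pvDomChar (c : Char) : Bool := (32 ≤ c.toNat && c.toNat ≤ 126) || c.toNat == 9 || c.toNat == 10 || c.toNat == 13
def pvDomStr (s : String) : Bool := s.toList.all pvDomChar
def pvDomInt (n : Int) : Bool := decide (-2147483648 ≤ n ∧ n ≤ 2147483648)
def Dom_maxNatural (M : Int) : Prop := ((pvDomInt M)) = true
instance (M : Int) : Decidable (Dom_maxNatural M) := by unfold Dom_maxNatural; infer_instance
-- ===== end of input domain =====

-- B replaces A's per-number loop (which builds str(i) for every i ≤ M) by a greedy
-- recursion over digit-length blocks, finishing the last block with one division.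

-- ===== PORT A =====
def maxNatural (M : Int) : Int :=
  let r := (PySem.List.pyRange 1 (M + 1)).foldl
    (fun st i =>
      let cifre := PySem.Str.len (PySem.Int.toStr i)
      if cifre ≤ st.1 then (st.1 - cifre, st.2 + 1) else st)
    (M, 0)
  r.2

-- ===== PORT B =====
-- `fuel` only makes the recursion structurally total; with the initial fuel the
-- 0-case is never reached (proved below).
def bCount (fuel : Nat) (remaining ans d lo : Int) : Int :=
  match fuel with
  | 0 => ans
  | fuel + 1 =>
    if remaining < d then ans
    else
      let block := 9 * lo
      let cost := block * d
      if remaining < cost then ans + PySem.Int.floordiv remaining d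
      else bCount fuel (remaining - cost) (ans + block) (d + 1) (lo * 10)

def maxNatural_alt (M : Int) : Int := bCount (M.toNat + 1) M 0 1 1

-- ===== PRECONDITION & SPEC =====
def Spec_maxNatural (M : Int) (out : Int) : Prop := out = maxNatural_alt M
instance (M : Int) (out : Int) : Decidable (Spec_maxNatural M out) := by unfold Spec_maxNatural; infer_instance

-- ===== CLAIM =====
def Claim_equal_maxNatural : Prop := ∀ (M : Int), Dom_maxNatural M → Spec_maxNatural M (maxNatural M)

-- ===== LEMMAS AND PROOFS =====

-- number of decimal digits of n (for n ≥ 1; dl 0 = 1 matches str(0))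
def dl (n : ℕ) : ℕ := Nat.log 10 n + 1

-- total number of characters needed to write 1,2,…,k
def S : ℕ → ℕ
  | 0 => 0
  | k + 1 => S k + dl (k + 1)

theorem toDigitsCore_succ (b f n : ℕ) (l : List Char) :
    Nat.toDigitsCore b (f + 1) n l =
      if n / b = 0 then (n % b).digitChar :: l
      else Nat.toDigitsCore b f (n / b) ((n % b).digitChar :: l) := by
  show (if n / b = 0 then (n % b).digitChar :: l
      else Nat.toDigitsCore b f (n / b) ((n % b).digitChar :: l)) = _
  rfl

theorem toDigitsCore_len : ∀ (f n : ℕ) (l : List Char), n ≤ f →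
    (Nat.toDigitsCore 10 (f + 1) n l).length = dl n + l.length := by
  intro f
  induction f with
  | zero =>
    intro n l hn
    interval_cases n
    rw [toDigitsCore_succ]
    simp [dl]
    omega
  | succ f ih =>
    intro n l hn
    rw [toDigitsCore_succ]
    by_cases h : n / 10 = 0
    · rw [if_pos h]
      have : Nat.log 10 n = 0 := Nat.log_of_lt (by omega)
      simp [dl, this]
      omega
    · have h10 : 10 ≤ n := by
        by_contra hc; exact h (Nat.div_eq_of_lt (by omega))
      have hlt : n / 10 < n := Nat.div_lt_self (by omega) (by omega)
      rw [if_neg h, ih (n / 10) _ (by omega)]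
      have hlog : Nat.log 10 (n / 10) = Nat.log 10 n - 1 := Nat.log_div_base 10 n
      have hpos : 0 < Nat.log 10 n := Nat.log_pos (by omega) h10
      simp only [dl, hlog, List.length_cons]
      omega

theorem toDigits_len (n : ℕ) : (Nat.toDigits 10 n).length = dl n := by
  have := toDigitsCore_len n n [] le_rfl
  simpa [Nat.toDigits] using this

theorem dl_pos (n : ℕ) : 1 ≤ dl n := by simp [dl]

theorem dl_mono {a b : ℕ} (h : a ≤ b) : dl a ≤ dl b := by
  simp [dl]; exact Nat.log_mono_right h

theorem le_S (k : ℕ) : k ≤ S k := by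
  induction k with
  | zero => simp [S]
  | succ k ih => have := dl_pos (k + 1); simp [S]; omega

theorem S_mono {a b : ℕ} (h : a ≤ b) : S a ≤ S b := by
  induction b with
  | zero =>
    have : a = 0 := by omega
    subst this
    exact le_rfl
  | succ b ih =>
    rcases Nat.lt_or_ge a (b + 1) with hl | hl
    · have := ih (by omega); simp [S]; omega
    · have : a = b + 1 := by omega
      subst this; rfl

-- the greatest k with S k ≤ M
def K (M : Int) : ℕ := Nat.findGreatest (fun k => (S k : Int) ≤ M) M.toNat

theorem key (M : Int) (hM : 0 ≤ M) (k : ℕ) : (S k : Int) ≤ M ↔ k ≤ K M := by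
  unfold K
  constructor
  · intro h
    exact Nat.le_findGreatest (by have := le_S k; omega) h
  · intro h
    have hK : (S (Nat.findGreatest (fun k : ℕ => (S k : Int) ≤ M) M.toNat) : Int) ≤ M :=
      Nat.findGreatest_spec (P := fun k : ℕ => (S k : Int) ≤ M) (m := 0) (by omega)
        (by show ((S 0 : ℕ) : Int) ≤ M; simp [S]; omega)
    have h2 : S k ≤ S (Nat.findGreatest (fun k : ℕ => (S k : Int) ≤ M) M.toNat) := S_mono h
    have h3 := (Nat.cast_le (α := Int)).mpr h2
    omega

theorem K_le (M : Int) : K M ≤ M.toNat := Nat.findGreatest_le (P := fun k => (S k : Int) ≤ M) M.toNat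

-- characters of str(i) for i = 1+k, k : ℕ
theorem strlen_eq (k : ℕ) : PySem.Str.len (PySem.Int.toStr (1 + (k : Int))) = (dl (k + 1) : Int) := by
  have h1 : ((1 : Int) + k).toNat = k + 1 := by omega
  have hneg : ¬ ((1 : Int) + k < 0) := by omega
  simp [PySem.Str.len, PySem.Int.toStr, PySem.Int.toChars, hneg, h1, toDigits_len]

theorem pyRange_eq (M : Int) :
    PySem.List.pyRange 1 (M + 1) = (List.range M.toNat).map (fun k : ℕ => 1 + (k : Int)) := by
  simp only [PySem.List.pyRange, if_neg (by norm_num : ¬(1 : ℤ) = 0),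
    if_pos (by norm_num : (0 : ℤ) < 1)]
  by_cases h : (1 : ℤ) < M + 1
  · rw [if_pos h]
    have h3 : (M + 1 - 1 + 1 - 1) / 1 = M := by simp
    rw [h3]
    apply List.map_congr_left
    intro k _
    simp
  · rw [if_neg h]
    have h3 : M.toNat = 0 := by omega
    simp [h3]

-- A's loop step
def gA : Int × Int → Int → Int × Int := fun st i =>
  let cifre := PySem.Str.len (PySem.Int.toStr i)
  if cifre ≤ st.1 then (st.1 - cifre, st.2 + 1) else st

theorem foldA (M : Int) (hM : 0 ≤ M) (j : ℕ) :
    ((List.range j).map (fun k : ℕ => 1 + (k : Int))).foldl gA (M, 0) =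
      ((M - (S (min j (K M)) : Int)), ((min j (K M) : ℕ) : Int)) := by
  induction j with
  | zero => simp [S]
  | succ j ih =>
    rw [List.range_succ, List.map_append, List.foldl_append, ih]
    simp only [List.map_cons, List.map_nil, List.foldl_cons, List.foldl_nil, gA]
    rw [strlen_eq j]
    rcases Nat.lt_or_ge j (K M) with hj | hj
    · -- min j (K M) = j
      have hmin : min j (K M) = j := by omega
      rw [hmin]
      by_cases hacc : j + 1 ≤ K M
      · have hS : (S (j + 1) : Int) ≤ M := (key M hM (j + 1)).2 hacc
        have hcond : (dl (j + 1) : Int) ≤ M - (S j : Int) := by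
          have : S (j + 1) = S j + dl (j + 1) := rfl
          omega
        rw [if_pos hcond]
        have hmin2 : min (j + 1) (K M) = j + 1 := by omega
        rw [hmin2]
        have hsum : S (j + 1) = S j + dl (j + 1) := rfl
        simp only [Prod.mk.injEq, hsum]
        push_cast
        omega
      · have hS : ¬ (S (j + 1) : Int) ≤ M := fun h => hacc ((key M hM (j + 1)).1 h)
        have hcond : ¬ (dl (j + 1) : Int) ≤ M - (S j : Int) := by
          have : S (j + 1) = S j + dl (j + 1) := rfl
          omega
        rw [if_neg hcond]
        have hmin2 : min (j + 1) (K M) = j := by omega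
        rw [hmin2]
    · -- min j (K M) = K M; the condition must fail
      have hmin : min j (K M) = K M := by omega
      rw [hmin]
      have hS : ¬ (S (K M + 1) : Int) ≤ M := by
        intro h
        have := (key M hM (K M + 1)).1 h
        omega
      have hmono : dl (K M + 1) ≤ dl (j + 1) := dl_mono (by omega)
      have hcond : ¬ (dl (j + 1) : Int) ≤ M - (S (K M) : Int) := by
        have : S (K M + 1) = S (K M) + dl (K M + 1) := rfl
        intro h; apply hS; omega
      rw [if_neg hcond]
      have hmin2 : min (j + 1) (K M) = K M := by omega
      rw [hmin2]

theorem maxNatural_eq_K (M : Int) (hM : 0 ≤ M) : maxNatural M = (K M : Int) := by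
  unfold maxNatural
  rw [pyRange_eq M]
  show (((List.range M.toNat).map (fun k : ℕ => 1 + (k : Int))).foldl gA (M, 0)).2 = _
  rw [foldA M hM M.toNat]
  have : min M.toNat (K M) = K M := by have := K_le M; omega
  simp [this]

-- all numbers in [10^(d-1), 10^d) have d digits
theorem dl_block {d : ℕ} (hd : 1 ≤ d) {i : ℕ} (h1 : 10 ^ (d - 1) ≤ i) (h2 : i < 10 * 10 ^ (d - 1)) :
    dl i = d := by
  have hlog : Nat.log 10 i = d - 1 := by
    apply Nat.log_eq_of_pow_le_of_lt_pow h1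
    calc i < 10 * 10 ^ (d - 1) := h2
    _ = 10 ^ (d - 1 + 1) := by ring
  simp [dl, hlog]; omega

theorem S_block {d : ℕ} (hd : 1 ≤ d) (L : ℕ) (hL : L = 10 ^ (d - 1)) :
    ∀ t, t ≤ 9 * L → S (L - 1 + t) = S (L - 1) + t * d := by
  have hL1 : 1 ≤ L := by rw [hL]; exact Nat.one_le_pow _ _ (by norm_num)
  intro t
  induction t with
  | zero => simp
  | succ t ih =>
    intro ht
    have heq : L - 1 + (t + 1) = (L - 1 + t) + 1 := by omega
    rw [heq]
    have : S ((L - 1 + t) + 1) = S (L - 1 + t) + dl (L - 1 + t + 1) := rfl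
    rw [this, ih (by omega)]
    have hdl : dl (L - 1 + t + 1) = d := by
      apply dl_block hd (by omega)
      omega
    rw [hdl]; ring

theorem bCount_eq (M : Int) (hM : 0 ≤ M) :
    ∀ (fuel d : ℕ), 1 ≤ d → ∀ (L : ℕ), L = 10 ^ (d - 1) →
    (S (L - 1) : Int) ≤ M → M - (S (L - 1) : Int) < fuel →
    bCount fuel (M - (S (L - 1) : Int)) ((L : Int) - 1) d L = (K M : Int) := by
  intro fuel
  induction fuel with
  | zero => intro d hd L hL h1 hf; omega
  | succ fuel ih =>
    intro d hd L hL h1 hf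
    have hL1 : 1 ≤ L := by rw [hL]; exact Nat.one_le_pow _ _ (by norm_num)
    set R : Int := M - (S (L - 1) : Int) with hR
    have hR0 : 0 ≤ R := by omega
    show bCount (fuel + 1) R ((L : Int) - 1) d L = (K M : Int)
    rw [bCount]
    by_cases hc1 : R < (d : Int)
    · rw [if_pos hc1]
      -- K M = L - 1
      have hSL : S L = S (L - 1) + d := by
        have h := S_block hd L hL 1 (by omega)
        have : L - 1 + 1 = L := by omega
        rw [this] at h; omega
      have hnot : ¬ (S L : Int) ≤ M := by push_cast [hSL]; omega
      have hlt : ¬ L ≤ K M := fun h => hnot ((key M hM L).2 h)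
      have hge : L - 1 ≤ K M := (key M hM (L - 1)).1 h1
      have : K M = L - 1 := by omega
      rw [this]; omega
    · rw [if_neg hc1]
      by_cases hc2 : R < 9 * (L : Int) * d
      · rw [if_pos hc2]
        have hdpos : (0 : Int) < d := by exact_mod_cast hd
        have hfd : PySem.Int.floordiv R d = R / d := by
          simp [PySem.Int.floordiv, Int.fdiv_eq_ediv, hdpos.le]
        rw [hfd]
        set q : Int := R / d with hq
        have hq1 : 1 ≤ q := by
          rw [hq]; exact Int.le_ediv_iff_mul_le hdpos |>.2 (by omega)
        have hqd : q * d ≤ R := Int.ediv_mul_le R (by omega)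
        have hqd2 : R < (q + 1) * d := Int.lt_ediv_add_one_mul_self R hdpos
        have hq9 : q < 9 * L := by nlinarith
        -- K M = L - 1 + q.toNat
        have hqn : ((q.toNat : Int)) = q := by omega
        have hle : (S (L - 1 + q.toNat) : Int) ≤ M := by
          rw [S_block hd L hL q.toNat (by omega)]
          push_cast; nlinarith [hqn]
        have hgt : ¬ (S (L - 1 + q.toNat + 1) : Int) ≤ M := by
          have heq : L - 1 + q.toNat + 1 = L - 1 + (q.toNat + 1) := by omega
          rw [heq, S_block hd L hL (q.toNat + 1) (by omega)]
          push_cast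
          nlinarith [hqn]
        have h2 : L - 1 + q.toNat ≤ K M := (key M hM _).1 hle
        have h3 : ¬ L - 1 + q.toNat + 1 ≤ K M := fun h => hgt ((key M hM _).2 h)
        have : K M = L - 1 + q.toNat := by omega
        rw [this]; push_cast; omega
      · rw [if_neg hc2]
        have hstep : S (10 * L - 1) = S (L - 1) + 9 * L * d := by
          have h := S_block hd L hL (9 * L) le_rfl
          have : L - 1 + 9 * L = 10 * L - 1 := by omega
          rw [this] at h; omega
        have harg1 : R - 9 * (L : Int) * d = M - (S (10 * L - 1) : Int) := by
          push_cast [hstep]; ring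
        have harg2 : (L : Int) - 1 + 9 * L = ((10 * L : ℕ) : Int) - 1 := by push_cast; ring
        have harg3 : (L : Int) * 10 = ((10 * L : ℕ) : Int) := by push_cast; ring
        rw [harg1]
        have hgoal := ih (d + 1) (by omega) (10 * L)
          (by rw [hL]; have : d + 1 - 1 = (d - 1) + 1 := by omega
              rw [this, pow_succ]; ring)
          (by rw [hstep]; push_cast; omega)
          (by have h9 : (d : Int) ≤ 9 * (L : Int) * d := by nlinarith [hL1, hd]
              rw [hstep] at *; push_cast at *; omega)
        calc bCount fuel (M - (S (10 * L - 1) : Int)) ((L : Int) - 1 + 9 * L) (d + 1) (L * 10)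
            = bCount fuel (M - (S (10 * L - 1) : Int)) (((10 * L : ℕ) : Int) - 1) (d + 1) ((10 * L : ℕ) : Int) := by
              rw [harg2, harg3]
          _ = (K M : Int) := hgoal

theorem alt_eq_K (M : Int) (hM : 0 ≤ M) : maxNatural_alt M = (K M : Int) := by
  unfold maxNatural_alt
  have h := bCount_eq M hM (M.toNat + 1) 1 le_rfl 1 (by norm_num)
    (by show ((0 : ℕ) : Int) ≤ M; omega)
    (by show M - ((0 : ℕ) : Int) < ((M.toNat + 1 : ℕ) : Int); push_cast; omega)
  simpa [S] using h

theorem neg_case (M : Int) (hM : M < 0) : maxNatural M = maxNatural_alt M := by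
  have h1 : maxNatural M = 0 := by
    unfold maxNatural
    have : PySem.List.pyRange 1 (M + 1) = [] := by
      rw [pyRange_eq M]
      have : M.toNat = 0 := by omega
      simp [this]
    rw [this]; simp
  have h2 : maxNatural_alt M = 0 := by
    unfold maxNatural_alt
    have : M.toNat = 0 := by omega
    rw [this]
    show bCount 1 M 0 1 1 = 0
    rw [bCount]
    rw [if_pos (by omega)]
  rw [h1, h2]

-- ===== VERDICT =====
theorem maxNatural_spec : Claim_equal_maxNatural := by
  intro M _
  unfold Spec_maxNatural
  rcases lt_or_ge M 0 with h | h
  · exact neg_case M h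
  · rw [maxNatural_eq_K M h, alt_eq_K M h]
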